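-- pv_equiv track=rewrite | github.com/TheSonder/2d-rt | python/examples/compare_radiomapseer_feature_maps.py | _group_from_layered_grid
-- ===== SOURCE A (Python) =====
-- def _group_from_layered_grid(
--     layered_grid: list[list[str]],
--     target: str,
--     included_sequences: set[str],
-- ) -> list[list[str]]:
--     grouped: list[list[str]] = []
--     for row in layered_grid:
--         grouped_row: list[str] = []
--         for label in row:
--             raw = str(label)
--             if raw in {"blocked", "unreachable"}:
--                 grouped_row.append(raw)
--                 continue
--             if raw == "L":
--                 grouped_row.append("L")
--                 continue
--             if len(raw) == 1 and set(raw) <= {"R", "D"}: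
--                 if target == "dpm" and raw in included_sequences:
--                     grouped_row.append("I1")
--                 elif target == "irt2":
--                     grouped_row.append("I1")
--                 else:
--                     grouped_row.append("unreachable")
--                 continue
--             if len(raw) == 2 and set(raw) <= {"R", "D"}:
--                 if target == "irt2" and raw in included_sequences:
--                     grouped_row.append("I2")
--                 else:
--                     grouped_row.append("unreachable")
--                 continue
--             grouped_row.append("unreachable")
--         grouped.append(grouped_row)
--     return grouped
-- ===== SOURCE B (Python) =====
-- def _group_from_layered_grid(
--     layered_grid: list[list[str]],
--     target: str,
--     included_sequences: set[str],
-- ) -> list[list[str]]: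
--     # Precompute a lookup table of the meaningful labels; everything else
--     # falls through to 'unreachable'.
--     table = {"blocked": "blocked", "unreachable": "unreachable", "L": "L"}
--     if target == "irt2" or (target == "dpm" and "R" in included_sequences):
--         table["R"] = "I1"
--     if target == "irt2" or (target == "dpm" and "D" in included_sequences):
--         table["D"] = "I1"
--     if target == "irt2":
--         if "RR" in included_sequences:
--             table["RR"] = "I2"
--         if "RD" in included_sequences:
--             table["RD"] = "I2"
--         if "DR" in included_sequences:
--             table["DR"] = "I2"
--         if "DD" in included_sequences:
--             table["DD"] = "I2"
--     return [[table.get(str(label), "unreachable") for label in row] for row in layered_grid]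
-- ===== Notes on version B (the rewrite author's own statement) =====
-- stated objective: idiomatic
-- what changed: Replaced the per-cell if/elif cascade with a lookup table built once from (target, included_sequences) and a nested map with default 'unreachable'.
import Mathlib
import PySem

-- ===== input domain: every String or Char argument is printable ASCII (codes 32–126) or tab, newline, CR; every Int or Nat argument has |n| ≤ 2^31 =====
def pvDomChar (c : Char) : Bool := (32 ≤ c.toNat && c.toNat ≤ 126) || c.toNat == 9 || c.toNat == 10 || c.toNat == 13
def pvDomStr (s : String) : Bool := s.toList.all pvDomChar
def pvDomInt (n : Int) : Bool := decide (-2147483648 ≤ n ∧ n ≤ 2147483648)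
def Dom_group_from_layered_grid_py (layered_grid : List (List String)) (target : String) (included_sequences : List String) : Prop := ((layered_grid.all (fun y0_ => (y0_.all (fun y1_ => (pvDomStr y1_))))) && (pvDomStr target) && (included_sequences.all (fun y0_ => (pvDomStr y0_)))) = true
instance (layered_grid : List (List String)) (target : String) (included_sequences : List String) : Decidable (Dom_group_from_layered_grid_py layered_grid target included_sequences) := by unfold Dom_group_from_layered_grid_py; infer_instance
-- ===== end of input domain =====

-- B replaces A's per-cell if/elif cascade by a lookup table built once from
-- (target, included_sequences), then a nested map with default "unreachable" (objective: idiomatic).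

-- ===== PORT A =====
-- literal transliteration of A's nested append-loops with the per-cell cascade inline
-- (str(label) on a str is the identity, so 'raw' below is the label itself;
--  'set(raw) <= {"R","D"}' is ported as raw.toList.all (· ∈ {'R','D'}))
def group_from_layered_grid_py (layered_grid : List (List String)) (target : String) (included_sequences : List String) : List (List String) :=
  layered_grid.foldl (fun grouped row =>
    grouped ++ [row.foldl (fun grouped_row raw =>
      if raw == "blocked" || raw == "unreachable" then grouped_row ++ [raw]
      else if raw == "L" then grouped_row ++ ["L"]
      else if raw.toList.length == 1 && raw.toList.all (fun c => c == 'R' || c == 'D') then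
        (if target == "dpm" && included_sequences.contains raw then grouped_row ++ ["I1"]
         else if target == "irt2" then grouped_row ++ ["I1"]
         else grouped_row ++ ["unreachable"])
      else if raw.toList.length == 2 && raw.toList.all (fun c => c == 'R' || c == 'D') then
        (if target == "irt2" && included_sequences.contains raw then grouped_row ++ ["I2"]
         else grouped_row ++ ["unreachable"])
      else grouped_row ++ ["unreachable"]) []]) []

-- ===== PORT B =====
def pvAltTable (target : String) (included_sequences : List String) : PySem.Dict String String :=
  let table := ((PySem.Dict.empty.insert "blocked" "blocked").insert "unreachable" "unreachable").insert "L" "L"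
  let table := if target == "irt2" || (target == "dpm" && included_sequences.contains "R") then table.insert "R" "I1" else table
  let table := if target == "irt2" || (target == "dpm" && included_sequences.contains "D") then table.insert "D" "I1" else table
  if target == "irt2" then
    let table := if included_sequences.contains "RR" then table.insert "RR" "I2" else table
    let table := if included_sequences.contains "RD" then table.insert "RD" "I2" else table
    let table := if included_sequences.contains "DR" then table.insert "DR" "I2" else table
    if included_sequences.contains "DD" then table.insert "DD" "I2" else table
  else table

def group_from_layered_grid_py_alt (layered_grid : List (List String)) (target : String) (included_sequences : List String) : List (List String) :=
  let table := pvAltTable target included_sequences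
  layered_grid.map (fun row => row.map (fun label => table.getD label "unreachable"))

-- ===== PRECONDITION & SPEC =====
def Spec_group_from_layered_grid_py (layered_grid : List (List String)) (target : String) (included_sequences : List String) (out : List (List String)) : Prop := out = group_from_layered_grid_py_alt layered_grid target included_sequences
instance (layered_grid : List (List String)) (target : String) (included_sequences : List String) (out : List (List String)) : Decidable (Spec_group_from_layered_grid_py layered_grid target included_sequences out) := by unfold Spec_group_from_layered_grid_py; infer_instance

-- ===== CLAIM (what is proved, stated in full; the proofs are below) =====
def Claim_equal_group_from_layered_grid_py : Prop := ∀ (layered_grid : List (List String)) (target : String) (included_sequences : List String), Dom_group_from_layered_grid_py layered_grid target included_sequences → Spec_group_from_layered_grid_py layered_grid target included_sequences (group_from_layered_grid_py layered_grid target included_sequences)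

-- ===== LEMMAS AND PROOFS =====

-- A's per-cell cascade, named for the proof
def pvCellA (target : String) (included_sequences : List String) (raw : String) : String :=
  if raw == "blocked" || raw == "unreachable" then raw
  else if raw == "L" then "L"
  else if raw.toList.length == 1 && raw.toList.all (fun c => c == 'R' || c == 'D') then
    (if target == "dpm" && included_sequences.contains raw then "I1"
     else if target == "irt2" then "I1"
     else "unreachable")
  else if raw.toList.length == 2 && raw.toList.all (fun c => c == 'R' || c == 'D') then
    (if target == "irt2" && included_sequences.contains raw then "I2"
     else "unreachable")
  else "unreachable"

lemma len_one_RD (raw : String) (h : (raw.toList.length == 1 && raw.toList.all (fun c => c == 'R' || c == 'D')) = true) :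
    raw = "R" ∨ raw = "D" := by
  simp only [Bool.and_eq_true, beq_iff_eq, List.all_eq_true, Bool.or_eq_true] at h
  obtain ⟨hlen, hall⟩ := h
  match hl : raw.toList, hlen with
  | [c], _ =>
    have hc := hall c (by simp [hl])
    have hmk : String.ofList raw.toList = String.ofList [c] := by rw [hl]
    rw [String.ofList_toList] at hmk
    rcases hc with hc | hc <;> subst hc <;> simp [hmk]

lemma len_two_RD (raw : String) (h : (raw.toList.length == 2 && raw.toList.all (fun c => c == 'R' || c == 'D')) = true) :
    raw = "RR" ∨ raw = "RD" ∨ raw = "DR" ∨ raw = "DD" := by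
  simp only [Bool.and_eq_true, beq_iff_eq, List.all_eq_true, Bool.or_eq_true] at h
  obtain ⟨hlen, hall⟩ := h
  match hl : raw.toList, hlen with
  | [c, d], _ =>
    have hc := hall c (by simp [hl])
    have hd := hall d (by simp [hl])
    have hmk : String.ofList raw.toList = String.ofList [c, d] := by rw [hl]
    rw [String.ofList_toList] at hmk
    rcases hc with hc | hc <;> rcases hd with hd | hd <;> subst hc <;> subst hd <;> simp [hmk]

set_option maxHeartbeats 2000000 in
lemma cell_eq (target : String) (included_sequences : List String) (raw : String) :
    pvCellA target included_sequences raw = (pvAltTable target included_sequences).getD raw "unreachable" := by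
  by_cases hb : raw = "blocked"
  · subst hb
    have h : pvCellA target included_sequences "blocked" = "blocked" := by simp [pvCellA]
    rw [h]; unfold pvAltTable; split_ifs <;> simp [PySem.Dict.getD_insert]
  by_cases hu : raw = "unreachable"
  · subst hu
    have h : pvCellA target included_sequences "unreachable" = "unreachable" := by simp [pvCellA]
    rw [h]; unfold pvAltTable; split_ifs <;> simp [PySem.Dict.getD_insert]
  by_cases hL : raw = "L"
  · subst hL
    have h : pvCellA target included_sequences "L" = "L" := by simp [pvCellA]
    rw [h]; unfold pvAltTable; split_ifs <;> simp [PySem.Dict.getD_insert]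
  by_cases hR : raw = "R"
  · subst hR
    have h : pvCellA target included_sequences "R"
        = (if target == "dpm" && included_sequences.contains "R" then "I1"
           else if target == "irt2" then "I1" else "unreachable") := by simp [pvCellA]
    rw [h]; unfold pvAltTable; split_ifs <;> simp_all [PySem.Dict.getD_insert]
  by_cases hD : raw = "D"
  · subst hD
    have h : pvCellA target included_sequences "D"
        = (if target == "dpm" && included_sequences.contains "D" then "I1"
           else if target == "irt2" then "I1" else "unreachable") := by simp [pvCellA]
    rw [h]; unfold pvAltTable; split_ifs <;> simp_all [PySem.Dict.getD_insert]
  by_cases hRR : raw = "RR"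
  · subst hRR
    have h : pvCellA target included_sequences "RR"
        = (if target == "irt2" && included_sequences.contains "RR" then "I2" else "unreachable") := by
      simp [pvCellA]
    rw [h]; unfold pvAltTable; split_ifs <;> simp_all [PySem.Dict.getD_insert]
  by_cases hRD : raw = "RD"
  · subst hRD
    have h : pvCellA target included_sequences "RD"
        = (if target == "irt2" && included_sequences.contains "RD" then "I2" else "unreachable") := by
      simp [pvCellA]
    rw [h]; unfold pvAltTable; split_ifs <;> simp_all [PySem.Dict.getD_insert]
  by_cases hDR : raw = "DR"
  · subst hDR
    have h : pvCellA target included_sequences "DR"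
        = (if target == "irt2" && included_sequences.contains "DR" then "I2" else "unreachable") := by
      simp [pvCellA]
    rw [h]; unfold pvAltTable; split_ifs <;> simp_all [PySem.Dict.getD_insert]
  by_cases hDD : raw = "DD"
  · subst hDD
    have h : pvCellA target included_sequences "DD"
        = (if target == "irt2" && included_sequences.contains "DD" then "I2" else "unreachable") := by
      simp [pvCellA]
    rw [h]; unfold pvAltTable; split_ifs <;> simp_all [PySem.Dict.getD_insert]
  -- raw is none of the table's keys: both sides give "unreachable"
  have h1 : ¬ (raw.toList.length == 1 && raw.toList.all (fun c => c == 'R' || c == 'D')) = true := by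
    intro h; rcases len_one_RD raw h with h | h <;> simp_all
  have h2 : ¬ (raw.toList.length == 2 && raw.toList.all (fun c => c == 'R' || c == 'D')) = true := by
    intro h; rcases len_two_RD raw h with h | h | h | h <;> simp_all
  have hLHS : pvCellA target included_sequences raw = "unreachable" := by
    unfold pvCellA
    rw [if_neg (by simp [hb, hu]), if_neg (by simp [hL]), if_neg h1, if_neg h2]
  rw [hLHS]; unfold pvAltTable
  split_ifs <;>
    simp [PySem.Dict.getD_insert, hb, hu, hL, hR, hD, hRR, hRD, hDR, hDD]

lemma inner_eq (target : String) (included_sequences : List String) (row : List String) :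
    row.foldl (fun grouped_row raw =>
      if raw == "blocked" || raw == "unreachable" then grouped_row ++ [raw]
      else if raw == "L" then grouped_row ++ ["L"]
      else if raw.toList.length == 1 && raw.toList.all (fun c => c == 'R' || c == 'D') then
        (if target == "dpm" && included_sequences.contains raw then grouped_row ++ ["I1"]
         else if target == "irt2" then grouped_row ++ ["I1"]
         else grouped_row ++ ["unreachable"])
      else if raw.toList.length == 2 && raw.toList.all (fun c => c == 'R' || c == 'D') then
        (if target == "irt2" && included_sequences.contains raw then grouped_row ++ ["I2"]
         else grouped_row ++ ["unreachable"])
      else grouped_row ++ ["unreachable"]) []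
    = row.map (pvCellA target included_sequences) := by
  have hfun : (fun (grouped_row : List String) (raw : String) =>
      if raw == "blocked" || raw == "unreachable" then grouped_row ++ [raw]
      else if raw == "L" then grouped_row ++ ["L"]
      else if raw.toList.length == 1 && raw.toList.all (fun c => c == 'R' || c == 'D') then
        (if target == "dpm" && included_sequences.contains raw then grouped_row ++ ["I1"]
         else if target == "irt2" then grouped_row ++ ["I1"]
         else grouped_row ++ ["unreachable"])
      else if raw.toList.length == 2 && raw.toList.all (fun c => c == 'R' || c == 'D') then
        (if target == "irt2" && included_sequences.contains raw then grouped_row ++ ["I2"]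
         else grouped_row ++ ["unreachable"])
      else grouped_row ++ ["unreachable"])
      = (fun grouped_row raw => grouped_row ++ [pvCellA target included_sequences raw]) := by
    funext grouped_row raw
    unfold pvCellA
    split_ifs <;> rfl
  rw [hfun, PySem.List.foldl_append_singleton_eq_map, List.nil_append]

-- ===== VERDICT (by name: the statement is the Claim_ definition above) =====
theorem group_from_layered_grid_py_spec : Claim_equal_group_from_layered_grid_py := by
  intro layered_grid target included_sequences _
  unfold Spec_group_from_layered_grid_py group_from_layered_grid_py group_from_layered_grid_py_alt
  simp only [inner_eq]
  rw [PySem.List.foldl_append_singleton_eq_map, List.nil_append]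
  exact List.map_congr_left (fun row _ => List.map_congr_left (fun label _ => cell_eq target included_sequences label))
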